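-- pv_equiv track=rewrite | github.com/AhmadNaweenSamandar/Python_Projects | Second_project_part_2.py | vote_percentage
-- ===== SOURCE A (Python) =====
-- def vote_percentage(results):
-- #as you can witness I've used the last question function again in first part of question 2.3
--     count_for_yes = 0
--     count_for_no = 0
--
--     for word in results.split():
--         count_for_yes += word == "yes"
--         count_for_no += word == "no"
--
--     total_count = count_for_yes + count_for_no
-- #there is the same count_for_yes and count_for_no functions and their sum total_count
--     return count_for_yes, total_count
-- ===== SOURCE B (Python) =====
-- def vote_percentage(results):
--     yes = 0
--     no = 0
--     word = ""
--     for ch in results + " ":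
--         if ch.isspace():
--             if word == "yes":
--                 yes += 1
--             elif word == "no":
--                 no += 1
--             word = ""
--         else:
--             word += ch
--     return yes, yes + no
-- ===== Notes on version B (the rewrite author's own statement) =====
-- stated objective: alternative
-- what changed: B never calls split(): it scans the string character by character as a state machine, assembling the current word inline and classifying it at each whitespace boundary, instead of A's split-into-a-word-list followed by a loop over the words.
import Mathlib
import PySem

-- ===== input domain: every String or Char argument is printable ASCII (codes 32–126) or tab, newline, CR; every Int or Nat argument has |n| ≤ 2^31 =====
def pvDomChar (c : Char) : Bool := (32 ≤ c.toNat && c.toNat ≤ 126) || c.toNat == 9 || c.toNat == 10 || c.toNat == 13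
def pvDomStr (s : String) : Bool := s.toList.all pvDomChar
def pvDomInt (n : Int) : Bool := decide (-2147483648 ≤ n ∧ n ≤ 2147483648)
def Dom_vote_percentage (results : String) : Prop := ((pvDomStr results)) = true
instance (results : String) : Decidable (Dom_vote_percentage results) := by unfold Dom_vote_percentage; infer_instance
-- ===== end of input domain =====

-- ===== PORT A =====
-- B replaces A's split-then-count-words loop by a character-level state machine that
-- assembles each word inline and classifies it at whitespace boundaries (objective: alternative).
def vote_percentage (results : String) : Int × Int :=
  let p := (PySem.Str.split₀ results).foldl
    (fun (p : Int × Int) w =>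
      ((p.1 + (if w == "yes" then 1 else 0)), (p.2 + (if w == "no" then 1 else 0))))
    (0, 0)
  (p.1, p.1 + p.2)

-- ===== PORT B =====
-- the loop body of B's `for ch in results + " "` loop (state: current word, yes count, no count)
def voteStep (st : List Char × Int × Int) (ch : Char) : List Char × Int × Int :=
  if PySem.Chars.isspace ch then
    if st.1 = "yes".toList then ([], st.2.1 + 1, st.2.2)
    else if st.1 = "no".toList then ([], st.2.1, st.2.2 + 1)
    else ([], st.2.1, st.2.2)
  else (st.1 ++ [ch], st.2.1, st.2.2)

def vote_percentage_alt (results : String) : Int × Int :=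
  let st := (results ++ " ").toList.foldl voteStep ([], 0, 0)
  (st.2.1, st.2.1 + st.2.2)

-- ===== PRECONDITION & SPEC =====
def Spec_vote_percentage (results : String) (out : Int × Int) : Prop := out = vote_percentage_alt results
instance (results : String) (out : Int × Int) : Decidable (Spec_vote_percentage results out) := by unfold Spec_vote_percentage; infer_instance

-- ===== CLAIM =====
def Claim_equal_vote_percentage : Prop := ∀ (results : String), Dom_vote_percentage results → Spec_vote_percentage results (vote_percentage results)

-- ===== LEMMAS AND PROOFS =====

-- the word list a flush adds: the current word, unless empty
def finishList (cur : List Char) : List (List Char) :=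
  if cur = [] then [] else [cur]

-- split₀.go with an accumulator is the accumulator (reversed) prepended
theorem go_acc (s : List Char) (cur : List Char) (acc : List (List Char)) :
    PySem.Chars.split₀.go s cur acc = acc.reverse ++ PySem.Chars.split₀.go s cur [] := by
  induction s generalizing cur acc with
  | nil =>
    simp only [PySem.Chars.split₀.go]
    by_cases h : cur.isEmpty <;> simp [h]
  | cons c rest ih =>
    by_cases hs : PySem.Chars.isspace c
    · by_cases h : cur.isEmpty
      · simp only [PySem.Chars.split₀.go, hs, h, if_true]
        exact ih [] acc
      · have h' : cur.isEmpty = false := by simpa using h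
        simp only [PySem.Chars.split₀.go, hs, h', if_true, Bool.false_eq_true, if_false]
        rw [ih [] (cur.reverse :: acc), ih [] [cur.reverse]]
        simp
    · have hs' : PySem.Chars.isspace c = false := by simpa using hs
      simp only [PySem.Chars.split₀.go, hs', Bool.false_eq_true, if_false]
      exact ih (c :: cur) acc

theorem go_nil_rev (cur : List Char) :
    PySem.Chars.split₀.go [] cur.reverse [] = finishList cur := by
  by_cases h : cur = [] <;>
    simp [PySem.Chars.split₀.go, finishList, h, List.isEmpty_iff]

theorem go_ws (c : Char) (rest cur : List Char) (hs : PySem.Chars.isspace c = true) :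
    PySem.Chars.split₀.go (c :: rest) cur.reverse [] =
      finishList cur ++ PySem.Chars.split₀.go rest [] [] := by
  by_cases h : cur = []
  · simp [PySem.Chars.split₀.go, finishList, h, hs]
  · have hne : cur.reverse.isEmpty = false := by simpa [List.isEmpty_iff] using h
    simp only [PySem.Chars.split₀.go, hs, if_true, hne, Bool.false_eq_true, if_false]
    rw [go_acc rest [] [cur.reverse.reverse]]
    simp [finishList, h]

theorem go_nonws (c : Char) (rest cur : List Char) (hs : PySem.Chars.isspace c = false) :
    PySem.Chars.split₀.go (c :: rest) cur.reverse [] =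
      PySem.Chars.split₀.go rest (c :: cur.reverse) [] := by
  simp [PySem.Chars.split₀.go, hs]

theorem count_finish (cur : List Char) (w : List Char) (hw : w ≠ []) (l : List (List Char)) :
    (finishList cur ++ l).count w = (if cur = w then 1 else 0) + l.count w := by
  by_cases hc : cur = w
  · subst hc
    simp [finishList, hw]
    omega
  · by_cases h : cur = []
    · simp [finishList, h]
      intro he; exact hw he
    · simp [finishList, h, hc]

theorem flush_eq (cur : List Char) (y n : Int) (c : Char)
    (hs : PySem.Chars.isspace c = true) :
    voteStep (cur, y, n) c =
      ([], y + (if cur = ['y', 'e', 's'] then 1 else 0),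
           n + (if cur = ['n', 'o'] then 1 else 0)) := by
  by_cases h : cur = ['y', 'e', 's']
  · subst h; simp [voteStep, hs]
  · by_cases h' : cur = ['n', 'o']
    · subst h'; simp [voteStep, hs]
    · simp [voteStep, hs, h, h']

-- the char-level machine computes the yes/no counts of split₀.go's word list
theorem machine_eq (s : List Char) (cur : List Char) (y n : Int) :
    (s ++ [' ']).foldl voteStep (cur, y, n) =
      ([], y + ((PySem.Chars.split₀.go s cur.reverse []).count ['y', 'e', 's'] : Int),
           n + ((PySem.Chars.split₀.go s cur.reverse []).count ['n', 'o'] : Int)) := by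
  induction s generalizing cur y n with
  | nil =>
    rw [List.nil_append, List.foldl_cons, List.foldl_nil,
      flush_eq cur y n ' ' (by decide), go_nil_rev]
    have hy := count_finish cur ['y', 'e', 's'] (by decide) []
    have hn := count_finish cur ['n', 'o'] (by decide) []
    simp only [List.append_nil] at hy hn
    rw [hy, hn]
    simp
  | cons c rest ih =>
    rw [List.cons_append, List.foldl_cons]
    by_cases hs : PySem.Chars.isspace c
    · rw [flush_eq cur y n c hs, go_ws c rest cur hs,
        count_finish cur ['y', 'e', 's'] (by decide), count_finish cur ['n', 'o'] (by decide)]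
      have h2 := ih [] (y + (if cur = ['y', 'e', 's'] then 1 else 0))
        (n + (if cur = ['n', 'o'] then 1 else 0))
      simp only [List.reverse_nil] at h2
      rw [h2]
      simp only [Prod.mk.injEq, true_and]
      push_cast
      constructor <;> ring
    · have hstep : voteStep (cur, y, n) c = (cur ++ [c], y, n) := by
        simp [voteStep, hs]
      rw [hstep, go_nonws c rest cur (by simpa using hs)]
      have h2 := ih (cur ++ [c]) y n
      simpa [List.reverse_append] using h2

-- A's word-list fold computes the same two counts
theorem fold_pair_eq (l : List String) (a b : Int) :
    l.foldl (fun (p : Int × Int) w =>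
      ((p.1 + (if w == "yes" then 1 else 0)), (p.2 + (if w == "no" then 1 else 0)))) (a, b)
    = (a + (l.count "yes" : Int), b + (l.count "no" : Int)) := by
  induction l generalizing a b with
  | nil => simp
  | cons x xs ih =>
    simp only [List.foldl_cons, ih, List.count_cons]
    by_cases h : x = "yes" <;> by_cases h' : x = "no" <;>
      simp [h, h'] <;> ring

theorem count_map_ofList (ps : List (List Char)) (w : String) :
    (ps.map String.ofList).count w = ps.count w.toList := by
  induction ps with
  | nil => rfl
  | cons p rest ih =>
    simp only [List.map_cons, List.count_cons, ih]
    congr 1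
    by_cases h : p = w.toList
    · simp [h]
    · have hne : String.ofList p ≠ w := by
        intro hc; exact h (by simpa using congrArg String.toList hc)
      simp [h, hne]

-- ===== VERDICT =====
theorem vote_percentage_spec : Claim_equal_vote_percentage := by
  intro results _
  unfold Spec_vote_percentage vote_percentage vote_percentage_alt
  simp only [PySem.Str.split₀, fold_pair_eq, count_map_ofList]
  have h := machine_eq results.toList [] 0 0
  have hl : (results ++ " ").toList = results.toList ++ [' '] := by simp
  simp only [List.reverse_nil] at h
  rw [hl, h]
  simp [PySem.Chars.split₀]
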